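-- pv_equiv track=rewrite | github.com/ChickenHawkXP/PDF-Parsing | main.py | fixlist
-- ===== SOURCE A (Python) =====
-- def fixlist(adlist):
--     for i in range(len(adlist)):
--         try:
--             if adlist[i].find(" ") == -1 or adlist[i].find(" ",len(adlist[i])-1) != -1:
--                 adlist[i] = adlist[i] + adlist[i+1]
--                 adlist.pop(i+1)
--         except IndexError:
--             break
--     return adlist
-- ===== SOURCE B (Python) =====
-- def fixlist(adlist):
--     out = []
--     i = 0
--     n = len(adlist)
--     while i < n:
--         s = adlist[i]
--         if (s.find(" ") == -1 or s.find(" ", len(s) - 1) != -1) and i + 1 < n: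
--             out.append(s + adlist[i + 1])
--             i += 2
--         else:
--             out.append(s)
--             i += 1
--     adlist[:] = out
--     return adlist
-- ===== Notes on version B (the rewrite author's own statement) =====
-- stated objective: faster
-- what changed: B builds a fresh output list in one forward index pass (merge head with its one successor, skip it) instead of A's in-place element assignment plus pop under a stale range() with try/except IndexError as the loop exit; the result is written back with adlist[:] so the in-place mutation and identity match A.
import Mathlib
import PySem

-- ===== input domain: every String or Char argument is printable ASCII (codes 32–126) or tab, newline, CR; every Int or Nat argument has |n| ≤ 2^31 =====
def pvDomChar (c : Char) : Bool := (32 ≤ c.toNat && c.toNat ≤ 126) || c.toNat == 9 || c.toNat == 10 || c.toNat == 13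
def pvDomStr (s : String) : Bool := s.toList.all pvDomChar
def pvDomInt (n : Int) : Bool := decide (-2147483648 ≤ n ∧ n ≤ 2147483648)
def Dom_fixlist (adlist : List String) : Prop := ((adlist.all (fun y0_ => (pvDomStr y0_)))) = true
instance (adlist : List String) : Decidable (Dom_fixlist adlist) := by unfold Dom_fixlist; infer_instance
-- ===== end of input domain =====

-- B merges in one forward pass over a fresh output list instead of mutating/popping under a stale range;
-- A mutates adlist in place (B mirrors that via slice assignment in Python; in Lean the return value is compared).

-- ===== PORT A =====
-- the merge test both Pythons literally contain: s.find(" ") == -1 or s.find(" ", len(s)-1) != -1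
def pvMergeCond (s : String) : Bool :=
  PySem.Str.find s " " == -1 || PySem.Str.findFrom s " " (PySem.Str.len s - 1) none != -1

-- for i in range(len(adlist)): try: … except IndexError: break   (fuel = the range, i = loop index, l = current list)
def fixlistLoop : Nat → Nat → List String → List String
  | 0, _, l => l
  | fuel + 1, i, l =>
    match PySem.List.pyGet? l (i : Int) with
    | none => l                    -- adlist[i] raises IndexError → break
    | some x =>
      if pvMergeCond x then
        match PySem.List.pyGet? l ((i : Int) + 1) with
        | none => l                -- adlist[i+1] raises IndexError → break (before any mutation)
        | some y =>
          let l1 := PySem.List.pySetD l (i : Int) (x ++ y)   -- adlist[i] = adlist[i] + adlist[i+1]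
          match PySem.List.pop? l1 ((i : Int) + 1) with      -- adlist.pop(i+1)
          | none => l1             -- unreachable here; a pop IndexError would also break
          | some r => fixlistLoop fuel (i + 1) r.2
      else fixlistLoop fuel (i + 1) l

def fixlist (adlist : List String) : List String := fixlistLoop adlist.length 0 adlist

-- ===== PORT B =====
-- the while loop of Source B, viewed over the not-yet-consumed suffix adlist[i:]: merge the head with its
-- successor when the condition holds and a successor exists (i+1 < n), else copy the head
def fixlistScan : List String → List String
  | [] => []
  | [s] => [s]
  | s :: t :: rest =>
    if pvMergeCond s then (s ++ t) :: fixlistScan rest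
    else s :: fixlistScan (t :: rest)

def fixlist_alt (adlist : List String) : List String := fixlistScan adlist

-- ===== PRECONDITION & SPEC =====
def Spec_fixlist (adlist : List String) (out : List String) : Prop := out = fixlist_alt adlist
instance (adlist : List String) (out : List String) : Decidable (Spec_fixlist adlist out) := by unfold Spec_fixlist; infer_instance

-- ===== CLAIM (what is proved, stated in full; the proofs are below) =====
def Claim_equal_fixlist : Prop := ∀ (adlist : List String), Dom_fixlist adlist → Spec_fixlist adlist (fixlist adlist)

-- ===== LEMMAS AND PROOFS =====

-- removing the element just after position done.length
theorem pvEraseIdxAppendCons (done : List String) (z y : String) (r : List String) :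
    (done ++ z :: y :: r).eraseIdx (done.length + 1) = done ++ z :: r := by
  induction done with
  | nil => simp [List.eraseIdx]
  | cons a t ih => simpa [List.eraseIdx] using ih

-- loop invariant: with the already-processed prefix 'done' (i = done.length) and enough fuel,
-- A's in-place loop produces 'done' followed by B's scan of the remaining suffix
theorem fixlistLoop_eq (fuel : Nat) :
    ∀ (done rest : List String), rest.length ≤ fuel →
      fixlistLoop fuel done.length (done ++ rest) = done ++ fixlistScan rest := by
  induction fuel with
  | zero =>
    intro done rest h
    have : rest = [] := List.eq_nil_of_length_eq_zero (Nat.le_zero.mp h)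
    subst this; simp [fixlistLoop, fixlistScan]
  | succ fuel ih =>
    intro done rest h
    match rest with
    | [] =>
      simp [fixlistLoop, fixlistScan]
    | [x] =>
      have hx : PySem.List.pyGet? (done ++ [x]) (done.length : Int) = some x :=
        PySem.List.pyGet?_append_length done [] x
      simp only [fixlistLoop, hx, fixlistScan]
      by_cases hc : pvMergeCond x
      · have hnone : PySem.List.pyGet? (done ++ [x]) ((done.length : Int) + 1) = none := by
          rw [PySem.List.pyGet?_eq_none_iff, PySem.Raise.InRange]
          simp
        simp [hc, hnone]
      · have := ih (done ++ [x]) [] (by simp)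
        simpa [hc, fixlistScan] using this
    | x :: y :: rest' =>
      have hx : PySem.List.pyGet? (done ++ x :: y :: rest') (done.length : Int) = some x :=
        PySem.List.pyGet?_append_length done (y :: rest') x
      simp only [fixlistLoop, hx]
      by_cases hc : pvMergeCond x
      · have hy : PySem.List.pyGet? (done ++ x :: y :: rest') ((done.length : Int) + 1) = some y := by
          have : done ++ x :: y :: rest' = (done ++ [x]) ++ y :: rest' := by simp
          rw [this]
          have : ((done.length : Int) + 1) = (((done ++ [x]).length : Nat) : Int) := by
            simp
          rw [this]
          exact PySem.List.pyGet?_append_length (done ++ [x]) rest' y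
        have hset : PySem.List.pySetD (done ++ x :: y :: rest') (done.length : Int) (x ++ y)
            = done ++ (x ++ y) :: y :: rest' := by
          rw [PySem.List.pySetD_natCast]
          simp
        have hpop : PySem.List.pop? (done ++ (x ++ y) :: y :: rest') ((done.length : Int) + 1)
            = some (y, done ++ (x ++ y) :: rest') := by
          have h1 : ((done.length : Int) + 1) = (((done.length + 1 : Nat)) : Int) := by push_cast; ring
          rw [h1, PySem.List.pop?_natCast]
          · rw [pvEraseIdxAppendCons done (x ++ y) y rest']
            simp [List.getElem_append_right]
          · simp
        rw [if_pos hc, hy]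
        simp only [hset, hpop]
        have := ih (done ++ [x ++ y]) rest' (by simp at h ⊢; omega)
        simpa [fixlistScan, hc] using this
      · have := ih (done ++ [x]) (y :: rest') (by simp at h ⊢; omega)
        simp only [hc]
        simpa [fixlistScan, hc] using this

-- ===== VERDICT (by name: the statement is the Claim_ definition above) =====
theorem fixlist_spec : Claim_equal_fixlist := by
  intro adlist _
  unfold Spec_fixlist fixlist fixlist_alt
  have := fixlistLoop_eq adlist.length [] adlist (le_refl _)
  simpa using this
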